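-- pv_equiv track=rewrite | github.com/Anand-Abhi13/my-hackerrank-solutions | packmanA.py | pacman_astar
-- ===== SOURCE A (Python) =====
-- def is_wall(grid, pos):
-- 	(row,col) = pos
-- 	return grid[row][col] == 37
--
-- def is_valid_position(grid, pos):
-- 	(row,col) = pos
-- 	rows = len(grid)
-- 	cols = len(grid[0])
-- 	if row < 0 or row >= rows:
-- 		return False
-- 	if col < 0 or col >= cols:
-- 		return False
-- 	return True
--
-- def manhattan_distance(pos_from, pos_to):
-- 	(r1,c1) = pos_from
-- 	(r,c) = pos_to
-- 	return abs(r1 - r) + abs(c1 - c)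
--
-- def heuristic(grid, pos, foodPos):
-- 	(fRow,fCol) = foodPos
-- 	h = manhattan_distance(pos, (fRow,fCol))
-- 	if pos == foodPos:
-- 		return h
-- 	else:
-- 		return 1 + h
--
-- def get_possible_moves(grid, pos):
-- 	(row, col) = pos
-- 	up = (row-1,col)
-- 	left = (row, col-1)
-- 	right = (row,col+1)
-- 	down = (row+1,col)
--
-- 	moves = []
--
-- 	if is_valid_position(grid, up) and not is_wall(grid, up):
-- 		moves.append(up)
-- 	if is_valid_position(grid, left) and not is_wall(grid, left):
-- 		moves.append(left)
-- 	if is_valid_position(grid, right) and not is_wall(grid, right):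
-- 		moves.append(right)
-- 	if is_valid_position(grid, down) and not is_wall(grid, down):
-- 		moves.append(down)
--
-- 	return moves
--
-- def remove_min_move(grid, moves, foodPos):
-- 	min_move = moves[0]
-- 	min_cost = 99999999
-- 	for pos in moves:
-- 		cost = heuristic(grid, pos, foodPos)
-- 		if min_cost > cost:
-- 			min_cost = cost
-- 			min_move = pos
-- 	moves.remove(min_move)
-- 	return (min_move, moves)
--
-- def pacman_astar(grid, pos, foodPos, path, visited):
-- 	if pos == foodPos:
-- 		return (True, len(path), path)
--
-- 	possible_moves = get_possible_moves(grid, pos)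
--
-- 	while len(possible_moves) > 0:
-- 		(min_move, moves_left) = remove_min_move(grid, possible_moves, foodPos)
-- 		possible_moves = moves_left
-- 		if min_move not in visited:
-- 			path.append(min_move)
-- 			visited.append(min_move)
-- 			(solved,cost, path) = pacman_astar(grid,min_move,foodPos,path,visited)
-- 			if solved:
-- 				return (solved, cost, path)
-- 			else:
-- 				path.remove(min_move)
-- 				visited.remove(min_move)
--
-- 	return (False,0, path)
-- ===== SOURCE B (Python) =====
-- def heuristic(grid, pos, foodPos):
-- 	h = abs(pos[0] - foodPos[0]) + abs(pos[1] - foodPos[1])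
-- 	return h if pos == foodPos else 1 + h
--
-- def get_possible_moves(grid, pos):
-- 	(row, col) = pos
-- 	candidates = [(row - 1, col), (row, col - 1), (row, col + 1), (row + 1, col)]
-- 	return [p for p in candidates
-- 		if 0 <= p[0] < len(grid) and 0 <= p[1] < len(grid[0]) and grid[p[0]][p[1]] != 37]
--
-- def pacman_astar(grid, pos, foodPos, path, visited):
-- 	if pos == foodPos:
-- 		return (True, len(path), path)
--
-- 	ordered = sorted(get_possible_moves(grid, pos), key=lambda p: heuristic(grid, p, foodPos))
-- 	for move in ordered:
-- 		if move not in visited: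
-- 			path.append(move)
-- 			visited.append(move)
-- 			(solved, cost, path) = pacman_astar(grid, move, foodPos, path, visited)
-- 			if solved:
-- 				return (solved, cost, path)
-- 			path.remove(move)
-- 			visited.remove(move)
--
-- 	return (False, 0, path)
-- ===== Notes on version B (the rewrite author's own statement) =====
-- stated objective: simpler
-- what changed: Replaced the while-loop that repeatedly rescans the move list with remove_min (deleting the helper) by one up-front stable sort of the moves by heuristic followed by a single for-pass; helpers are condensed into comprehension/boolean-expression form.
-- outside the precondition, e.g. on pacman_astar([], (0, 0), (1, 1), [], []): A raises IndexError, B returns (False, 0, [])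
import Mathlib
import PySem

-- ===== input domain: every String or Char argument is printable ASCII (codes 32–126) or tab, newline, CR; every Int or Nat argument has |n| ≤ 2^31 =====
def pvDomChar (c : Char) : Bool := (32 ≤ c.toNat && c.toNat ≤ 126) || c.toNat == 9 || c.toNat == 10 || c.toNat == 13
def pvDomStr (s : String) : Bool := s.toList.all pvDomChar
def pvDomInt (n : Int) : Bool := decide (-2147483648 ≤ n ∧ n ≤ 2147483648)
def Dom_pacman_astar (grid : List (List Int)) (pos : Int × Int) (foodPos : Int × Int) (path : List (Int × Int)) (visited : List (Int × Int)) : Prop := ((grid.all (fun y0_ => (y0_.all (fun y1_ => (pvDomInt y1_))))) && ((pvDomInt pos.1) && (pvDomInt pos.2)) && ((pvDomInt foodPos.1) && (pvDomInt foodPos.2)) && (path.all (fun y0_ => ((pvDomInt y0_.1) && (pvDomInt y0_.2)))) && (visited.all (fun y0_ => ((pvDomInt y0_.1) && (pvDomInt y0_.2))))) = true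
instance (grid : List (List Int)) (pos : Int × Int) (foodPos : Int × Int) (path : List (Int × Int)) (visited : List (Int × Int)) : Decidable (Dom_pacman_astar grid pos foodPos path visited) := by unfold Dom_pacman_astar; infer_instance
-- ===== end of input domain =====

-- B replaces A's repeated remove_min minimum-extraction loop with one stable sort of the moves by
-- heuristic followed by a single pass (objective: simpler).  Python A and B mutate `path`/`visited`
-- in place; the equivalence proved here is about the RETURN value only.  Both ports model the
-- mutation functionally: the returned path is threaded through recursive calls, while `visited` is
-- kept across a failed branch because Python restores it exactly there (each removed element was
-- appended while absent).  The recursion runs on a fuel of rows*cols+1, which the exploration can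
-- never exhaust (each nested call adds a distinct in-grid cell to `visited`); the loop over the
-- moves of one cell is a helper taking the recursive search as its continuation `go`.

-- ===== PORT A =====
def isWallA (grid : List (List Int)) (p : Int × Int) : Bool :=
  (PySem.List.pyGet? ((PySem.List.pyGet? grid p.1).getD []) p.2).getD 0 == 37

def isValidA (grid : List (List Int)) (p : Int × Int) : Bool :=
  let rows : Int := grid.length
  let cols : Int := (grid.headD []).length
  if p.1 < 0 ∨ p.1 ≥ rows then false
  else if p.2 < 0 ∨ p.2 ≥ cols then false
  else true

def manhattanA (a b : Int × Int) : Int := |a.1 - b.1| + |a.2 - b.2|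

def heuristicA (grid : List (List Int)) (p foodPos : Int × Int) : Int :=
  let h := manhattanA p foodPos
  if p = foodPos then h else 1 + h

def possibleMovesA (grid : List (List Int)) (p : Int × Int) : List (Int × Int) :=
  let up    := (p.1 - 1, p.2)
  let left  := (p.1, p.2 - 1)
  let right := (p.1, p.2 + 1)
  let down  := (p.1 + 1, p.2)
  (if isValidA grid up && !isWallA grid up then [up] else []) ++
  (if isValidA grid left && !isWallA grid left then [left] else []) ++
  (if isValidA grid right && !isWallA grid right then [right] else []) ++
  (if isValidA grid down && !isWallA grid down then [down] else [])

def removeMinA (grid : List (List Int)) (moves : List (Int × Int)) (foodPos : Int × Int) :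
    (Int × Int) × List (Int × Int) :=
  let r := moves.foldl
    (fun s p => let cost := heuristicA grid p foodPos; if s.2 > cost then (p, cost) else s)
    (moves.headD (0, 0), (99999999 : Int))
  (r.1, (PySem.List.remove? moves r.1).getD moves)

-- termination lemmas for the A-side while-loop (cited in decreasing_by)
theorem removeMinA_fst_mem (grid : List (List Int)) (moves : List (Int × Int))
    (foodPos : Int × Int) (h : moves ≠ []) : (removeMinA grid moves foodPos).1 ∈ moves := by
  have key : ∀ (l : List (Int × Int)) (s : (Int × Int) × Int),
      s.1 ∈ moves → (∀ x ∈ l, x ∈ moves) →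
      (l.foldl (fun s p => let cost := heuristicA grid p foodPos;
        if s.2 > cost then (p, cost) else s) s).1 ∈ moves := by
    intro l
    induction l with
    | nil => intro s hs _; exact hs
    | cons a t ih =>
      intro s hs hl
      rw [List.foldl_cons]
      apply ih
      · dsimp only
        split
        · exact hl a (by simp)
        · exact hs
      · exact fun x hx => hl x (by simp [hx])
  unfold removeMinA
  apply key
  · cases moves with
    | nil => exact absurd rfl h
    | cons a t => simp
  · exact fun x hx => hx

theorem removeMinA_snd_length (grid : List (List Int)) (moves : List (Int × Int))
    (foodPos : Int × Int) (h : moves ≠ []) :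
    (removeMinA grid moves foodPos).2.length < moves.length := by
  have hm := removeMinA_fst_mem grid moves foodPos h
  have h2 : (removeMinA grid moves foodPos).2 =
      (PySem.List.remove? moves (removeMinA grid moves foodPos).1).getD moves := rfl
  rw [h2, PySem.List.remove?_eq_some_erase moves _ hm, Option.getD_some,
    List.length_erase_of_mem hm]
  have : moves.length ≠ 0 := by simpa using h
  omega

-- the `while len(possible_moves) > 0` loop of A; `go` is the recursive search on the chosen move
def loopA (grid : List (List Int)) (foodPos : Int × Int)
    (go : (Int × Int) → List (Int × Int) → List (Int × Int) → Bool × Int × (List (Int × Int)))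
    (moves path visited : List (Int × Int)) : Bool × Int × (List (Int × Int)) :=
  match h : moves with
  | [] => (false, 0, path)
  | _ :: _ =>
    let mr := removeMinA grid moves foodPos
    if mr.1 ∈ visited then loopA grid foodPos go mr.2 path visited
    else
      let res := go mr.1 (path ++ [mr.1]) (visited ++ [mr.1])
      if res.1 then (true, res.2.1, res.2.2)
      else loopA grid foodPos go mr.2 ((PySem.List.remove? res.2.2 mr.1).getD res.2.2) visited
termination_by moves.length
decreasing_by
  all_goals rw [h]; exact removeMinA_snd_length _ _ _ (by simp [h])

def goA (grid : List (List Int)) (foodPos : Int × Int) : Nat → (Int × Int) →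
    List (Int × Int) → List (Int × Int) → Bool × Int × (List (Int × Int))
  | 0, _, path, _ => (false, 0, path)       -- fuel guard only; never reached with the wrapper's fuel
  | fuel + 1, pos, path, visited =>
    if pos = foodPos then (true, (path.length : Int), path)
    else loopA grid foodPos (goA grid foodPos fuel) (possibleMovesA grid pos) path visited

def pacman_astar (grid : List (List Int)) (pos : Int × Int) (foodPos : Int × Int)
    (path : List (Int × Int)) (visited : List (Int × Int)) : Bool × Int × (List (Int × Int)) :=
  goA grid foodPos (grid.length * (grid.headD []).length + 1) pos path visited

-- ===== PORT B =====
def heuristicB (grid : List (List Int)) (p foodPos : Int × Int) : Int :=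
  let h := |p.1 - foodPos.1| + |p.2 - foodPos.2|
  if p = foodPos then h else 1 + h

def movesB (grid : List (List Int)) (p : Int × Int) : List (Int × Int) :=
  [(p.1 - 1, p.2), (p.1, p.2 - 1), (p.1, p.2 + 1), (p.1 + 1, p.2)].filter
    (fun q => decide (0 ≤ q.1 ∧ q.1 < (grid.length : Int)) &&
      (decide (0 ≤ q.2 ∧ q.2 < ((grid.headD []).length : Int)) &&
        ((PySem.List.pyGet? ((PySem.List.pyGet? grid q.1).getD []) q.2).getD 0 != 37)))

-- the `for move in ordered` loop of B; `go` is the recursive search on the chosen move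
def loopB (grid : List (List Int)) (foodPos : Int × Int)
    (go : (Int × Int) → List (Int × Int) → List (Int × Int) → Bool × Int × (List (Int × Int))) :
    List (Int × Int) → List (Int × Int) → List (Int × Int) → Bool × Int × (List (Int × Int))
  | [], path, _ => (false, 0, path)
  | m :: rest, path, visited =>
    if m ∈ visited then loopB grid foodPos go rest path visited
    else
      let res := go m (path ++ [m]) (visited ++ [m])
      if res.1 then (true, res.2.1, res.2.2)
      else loopB grid foodPos go rest ((PySem.List.remove? res.2.2 m).getD res.2.2) visited

def goB (grid : List (List Int)) (foodPos : Int × Int) : Nat → (Int × Int) →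
    List (Int × Int) → List (Int × Int) → Bool × Int × (List (Int × Int))
  | 0, _, path, _ => (false, 0, path)       -- fuel guard only; never reached with the wrapper's fuel
  | fuel + 1, pos, path, visited =>
    if pos = foodPos then (true, (path.length : Int), path)
    else loopB grid foodPos (goB grid foodPos fuel)
      (PySem.List.sorted (movesB grid pos) (fun q => heuristicB grid q foodPos)) path visited

def pacman_astar_alt (grid : List (List Int)) (pos : Int × Int) (foodPos : Int × Int)
    (path : List (Int × Int)) (visited : List (Int × Int)) : Bool × Int × (List (Int × Int)) :=
  goB grid foodPos (grid.length * (grid.headD []).length + 1) pos path visited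

-- ===== PRECONDITION & SPEC =====
-- Pre_ excludes, for starting positions that have at least one in-grid neighbour, (i) inputs on
-- which A raises IndexError (an empty grid, or a grid whose later rows are shorter than row 0 so a
-- wall probe can run off a row), and (ii) grids with a cell at Manhattan distance ≥ 99999998 from
-- foodPos, where A's 99999999 sentinel in remove_min saturates and the exploration order (hence the
-- returned path) is an accident of A's implementation.
def Pre_pacman_astar (grid : List (List Int)) (pos : Int × Int) (foodPos : Int × Int)
    (path : List (Int × Int)) (visited : List (Int × Int)) : Prop :=
  pos = foodPos ∨
    (grid ≠ [] ∧
      ∀ q ∈ [(pos.1 - 1, pos.2), (pos.1, pos.2 - 1), (pos.1, pos.2 + 1), (pos.1 + 1, pos.2)],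
      ¬ (0 ≤ q.1 ∧ q.1 < (grid.length : Int) ∧ 0 ≤ q.2 ∧ q.2 < ((grid.headD []).length : Int))) ∨
    (grid ≠ [] ∧ (∀ row ∈ grid, (grid.headD []).length ≤ row.length) ∧
      (∀ r ∈ List.range grid.length, ∀ c ∈ List.range (grid.headD []).length,
        |(r : Int) - foodPos.1| + |(c : Int) - foodPos.2| < 99999998))

instance (grid : List (List Int)) (pos : Int × Int) (foodPos : Int × Int)
    (path : List (Int × Int)) (visited : List (Int × Int)) :
    Decidable (Pre_pacman_astar grid pos foodPos path visited) := by
  unfold Pre_pacman_astar; infer_instance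

def pvWitness_pacman_astar :
    List (List Int) × (Int × Int) × (Int × Int) × (List (Int × Int)) × (List (Int × Int)) :=
  ([[0, 0]], (0, 0), (0, 1), [], [])

def Spec_pacman_astar (grid : List (List Int)) (pos : Int × Int) (foodPos : Int × Int)
    (path : List (Int × Int)) (visited : List (Int × Int)) (out : Bool × Int × (List (Int × Int))) :
    Prop :=
  out = pacman_astar_alt grid pos foodPos path visited

instance (grid : List (List Int)) (pos : Int × Int) (foodPos : Int × Int)
    (path : List (Int × Int)) (visited : List (Int × Int)) (out : Bool × Int × (List (Int × Int))) :
    Decidable (Spec_pacman_astar grid pos foodPos path visited out) := by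
  unfold Spec_pacman_astar; infer_instance

-- ===== CLAIM =====
def Claim_equal_pacman_astar : Prop :=
  ∀ (grid : List (List Int)) (pos : Int × Int) (foodPos : Int × Int)
    (path : List (Int × Int)) (visited : List (Int × Int)),
    Dom_pacman_astar grid pos foodPos path visited →
    Pre_pacman_astar grid pos foodPos path visited →
    Spec_pacman_astar grid pos foodPos path visited (pacman_astar grid pos foodPos path visited)

-- ===== LEMMAS AND PROOFS =====

-- insert before the first strictly-greater key: seeding the insertion-sort fold with [x]
def pvIns {α : Type} (k : α → Int) (x : α) : List α → List α
  | [] => [x]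
  | y :: t => if k x ≤ k y then x :: y :: t else y :: pvIns k x t

-- first element of x :: xs with minimal key (ties to the earlier one)
def pvFmin {α : Type} (k : α → Int) (x : α) : List α → α
  | [] => x
  | y :: t => if k x ≤ k (pvFmin k y t) then x else pvFmin k y t

theorem pvFmin_mem {α : Type} (k : α → Int) (xs : List α) :
    ∀ x, pvFmin k x xs ∈ x :: xs := by
  induction xs with
  | nil => intro x; simp [pvFmin]
  | cons y t ih =>
    intro x
    simp only [pvFmin]
    split
    · simp
    · have h := ih y
      simp only [List.mem_cons] at h ⊢
      tauto

theorem pvFmin_le {α : Type} (k : α → Int) (xs : List α) :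
    ∀ x, ∀ y ∈ x :: xs, k (pvFmin k x xs) ≤ k y := by
  induction xs with
  | nil => intro x y hy; simp at hy; simp [pvFmin, hy]
  | cons z t ih =>
    intro x y hy
    simp only [pvFmin]
    split
    · rename_i hle
      rcases List.mem_cons.mp hy with rfl | hy'
      · exact le_refl _
      · exact le_trans hle (ih z y hy')
    · rename_i hle
      rcases List.mem_cons.mp hy with rfl | hy'
      · omega
      · exact ih z y hy'

theorem pvFmin_cons_lt {α : Type} (k : α → Int) (t : List α) (mm p : α)
    (h : k p < k mm) : pvFmin k mm (p :: t) = pvFmin k p t := by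
  have hle := pvFmin_le k t p p (by simp)
  simp only [pvFmin]
  rw [if_neg (by omega)]

theorem pvFmin_cons_ge {α : Type} (k : α → Int) (t : List α) (mm p : α)
    (h : k mm ≤ k p) : pvFmin k mm (p :: t) = pvFmin k mm t := by
  cases t with
  | nil =>
    have e : pvFmin k mm [p] = if k mm ≤ k (pvFmin k p []) then mm else pvFmin k p [] := rfl
    rw [e]
    simp [pvFmin, h]
  | cons z t' =>
    have e1 : pvFmin k mm (p :: z :: t') =
        if k mm ≤ k (pvFmin k p (z :: t')) then mm else pvFmin k p (z :: t') := rfl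
    have e2 : pvFmin k p (z :: t') =
        if k p ≤ k (pvFmin k z t') then p else pvFmin k z t' := rfl
    have e3 : pvFmin k mm (z :: t') =
        if k mm ≤ k (pvFmin k z t') then mm else pvFmin k z t' := rfl
    rw [e1, e2, e3]
    split_ifs <;> first | rfl | omega

theorem pvIns_front {α : Type} (k : α → Int) (x : α) (s : List α)
    (h : ∀ z ∈ s, k x ≤ k z) : pvIns k x s = x :: s := by
  cases s with
  | nil => rfl
  | cons z t => simp [pvIns, h z (by simp)]

theorem iB_nil {α : Type} (k : α → Int) (z : α) :
    PySem.List.insertBy (fun a b => decide (k a < k b)) z [] = [z] := rfl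

theorem iB_cons {α : Type} (k : α → Int) (z y : α) (ys : List α) :
    PySem.List.insertBy (fun a b => decide (k a < k b)) z (y :: ys) =
    if k z < k y then z :: y :: ys else y :: PySem.List.insertBy (fun a b => decide (k a < k b)) z ys := by
  simp only [PySem.List.insertBy, decide_eq_true_eq]

theorem pvIns_cons {α : Type} (k : α → Int) (x y : α) (t : List α) :
    pvIns k x (y :: t) = if k x ≤ k y then x :: y :: t else y :: pvIns k x t := rfl

theorem pvIns_commute {α : Type} (k : α → Int) (z x : α) (s : List α) :
    PySem.List.insertBy (fun a b => decide (k a < k b)) z (pvIns k x s) =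
    pvIns k x (PySem.List.insertBy (fun a b => decide (k a < k b)) z s) := by
  induction s with
  | nil =>
    rw [show pvIns k x [] = [x] from rfl, iB_nil, iB_cons, iB_nil, pvIns_cons,
      show pvIns k x [] = [x] from rfl]
    by_cases h : k z < k x
    · rw [if_pos h, if_neg (by omega)]
    · rw [if_neg h, if_pos (by omega)]
  | cons a s ih =>
    rw [pvIns_cons, iB_cons k z a s]
    by_cases hxa : k x ≤ k a
    · rw [if_pos hxa, iB_cons k z x]
      by_cases hzx : k z < k x
      · rw [if_pos hzx, if_pos (by omega), pvIns_cons, if_neg (by omega), pvIns_cons,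
          if_pos hxa]
      · rw [if_neg hzx, iB_cons k z a s]
        by_cases hza : k z < k a
        · rw [if_pos hza, pvIns_cons, if_pos (by omega)]
        · rw [if_neg hza, pvIns_cons, if_pos hxa]

    · rw [if_neg hxa, iB_cons k z a]
      by_cases hza : k z < k a
      · simp only [if_pos hza]
        rw [pvIns_cons, if_neg (by omega), pvIns_cons, if_neg hxa]
      · simp only [if_neg hza]
        rw [pvIns_cons, if_neg hxa, ih]

theorem pvIns_foldl {α : Type} (k : α → Int) (zs : List α) :
    ∀ (s : List α) (x : α),
      zs.foldl (fun acc z => PySem.List.insertBy (fun a b => decide (k a < k b)) z acc)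
        (pvIns k x s) =
      pvIns k x (zs.foldl (fun acc z => PySem.List.insertBy (fun a b => decide (k a < k b)) z acc) s) := by
  induction zs with
  | nil => intro s x; rfl
  | cons z zs ih =>
    intro s x
    rw [List.foldl_cons, List.foldl_cons, pvIns_commute]
    exact ih _ x

theorem sorted_cons_pvIns {α : Type} (k : α → Int) (x : α) (zs : List α) :
    PySem.List.sorted (x :: zs) k = pvIns k x (PySem.List.sorted zs k) := by
  rw [PySem.List.sorted_eq_foldl_insertBy, PySem.List.sorted_eq_foldl_insertBy,
    List.foldl_cons]
  have h1 : PySem.List.insertBy (fun a b => decide (k a < k b)) x ([] : List α) = pvIns k x [] :=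
    rfl
  rw [h1]
  exact pvIns_foldl k zs [] x

-- stable sort = first-min extraction: the head of sorted(x::xs) is the first minimal element
theorem sorted_sel {α : Type} [DecidableEq α] (k : α → Int) (xs : List α) :
    ∀ x, PySem.List.sorted (x :: xs) k =
      pvFmin k x xs :: PySem.List.sorted ((x :: xs).erase (pvFmin k x xs)) k := by
  induction xs with
  | nil => intro x; simp [pvFmin, PySem.List.sorted, PySem.List.insertBy]
  | cons y t ih =>
    intro x
    by_cases hx : k x ≤ k (pvFmin k y t)
    · have hfm : pvFmin k x (y :: t) = x := by simp [pvFmin, hx]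
      rw [hfm, List.erase_cons_head, sorted_cons_pvIns]
      apply pvIns_front
      intro z hz
      rw [PySem.List.mem_sorted] at hz
      exact le_trans hx (pvFmin_le k t y z hz)
    · have hfm : pvFmin k x (y :: t) = pvFmin k y t := by simp [pvFmin, hx]
      have hne : x ≠ pvFmin k y t := by
        intro h; rw [← h] at hx; omega
      rw [hfm, List.erase_cons_tail (by simpa using hne)]
      rw [sorted_cons_pvIns, ih y, sorted_cons_pvIns]
      simp [pvIns, hx]

-- A's remove_min under the sentinel bound is exactly first-min extraction
theorem removeMinA_fold_eq (grid : List (List Int)) (foodPos : Int × Int)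
    (t : List (Int × Int)) :
    ∀ mm : Int × Int,
      t.foldl (fun s p =>
        if s.2 > heuristicA grid p foodPos then (p, heuristicA grid p foodPos) else s)
        (mm, heuristicA grid mm foodPos) =
      (pvFmin (fun q => heuristicA grid q foodPos) mm t,
        heuristicA grid (pvFmin (fun q => heuristicA grid q foodPos) mm t) foodPos) := by
  induction t with
  | nil => intro mm; simp [pvFmin]
  | cons p t ih =>
    intro mm
    rw [List.foldl_cons]
    dsimp only
    by_cases hc : heuristicA grid p foodPos < heuristicA grid mm foodPos
    · rw [if_pos (by exact hc), ih p, pvFmin_cons_lt _ _ _ _ hc]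
    · rw [if_neg (by exact hc), ih mm,
        pvFmin_cons_ge (fun q => heuristicA grid q foodPos) t mm p
          (by show heuristicA grid mm foodPos ≤ heuristicA grid p foodPos; omega)]

theorem removeMinA_eq (grid : List (List Int)) (foodPos : Int × Int) (x : Int × Int)
    (xs : List (Int × Int))
    (hb : ∀ p ∈ x :: xs, heuristicA grid p foodPos < 99999999) :
    removeMinA grid (x :: xs) foodPos =
      (pvFmin (fun q => heuristicA grid q foodPos) x xs,
        (x :: xs).erase (pvFmin (fun q => heuristicA grid q foodPos) x xs)) := by
  have hx : heuristicA grid x foodPos < 99999999 := hb x (by simp)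
  unfold removeMinA
  rw [List.foldl_cons]
  dsimp only [List.headD_cons]
  rw [if_pos (by exact hx), removeMinA_fold_eq grid foodPos xs x]
  have hmem := pvFmin_mem (fun q => heuristicA grid q foodPos) xs x
  rw [PySem.List.remove?_eq_some_erase _ _ hmem, Option.getD_some]

-- elements produced by get_possible_moves are valid positions
theorem mem_possibleMovesA_valid (grid : List (List Int)) (pos : Int × Int) :
    ∀ p ∈ possibleMovesA grid pos, isValidA grid p = true := by
  intro p hp
  unfold possibleMovesA at hp
  simp only [List.mem_append] at hp
  rcases hp with ((hp | hp) | hp) | hp <;>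
  · split_ifs at hp <;> simp_all

theorem isValidA_decide (grid : List (List Int)) (p : Int × Int) :
    (decide (0 ≤ p.1 ∧ p.1 < (grid.length : Int)) &&
      decide (0 ≤ p.2 ∧ p.2 < ((grid.headD []).length : Int))) = isValidA grid p := by
  show _ = if p.1 < 0 ∨ p.1 ≥ (grid.length : Int) then false
    else if p.2 < 0 ∨ p.2 ≥ ((grid.headD []).length : Int) then false else true
  split_ifs <;> simp_all <;> omega

theorem heuristicB_eq : @heuristicB = @heuristicA := by
  funext g p f
  simp [heuristicA, heuristicB, manhattanA]

theorem movesB_eq (grid : List (List Int)) (p : Int × Int) :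
    movesB grid p = possibleMovesA grid p := by
  have hq : ∀ q : Int × Int,
      (decide (0 ≤ q.1 ∧ q.1 < (grid.length : Int)) &&
        (decide (0 ≤ q.2 ∧ q.2 < ((grid.headD []).length : Int)) &&
          ((PySem.List.pyGet? ((PySem.List.pyGet? grid q.1).getD []) q.2).getD 0 != 37))) =
      (isValidA grid q && !isWallA grid q) := by
    intro q
    rw [← Bool.and_assoc, isValidA_decide]
    rfl
  unfold movesB
  show _ = possibleMovesA grid p
  unfold possibleMovesA
  simp only [List.filter_cons, List.filter_nil, hq]
  split_ifs <;> simp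

theorem erase_inst_eq (l : List (Int × Int)) (a : Int × Int) :
    @List.erase (Int × Int) instBEqOfDecidableEq l a = l.erase a := by
  induction l with
  | nil => rfl
  | cons b t ih => by_cases h : b = a <;> simp [h, ih]

-- main loop lemma: A's extract-min loop equals B's pass over the sorted list
theorem loop_eq (grid : List (List Int)) (foodPos : Int × Int)
    (gA gB : (Int × Int) → List (Int × Int) → List (Int × Int) → Bool × Int × (List (Int × Int)))
    (hgo : ∀ pos path visited, gA pos path visited = gB pos path visited) :
    ∀ (n : Nat) (moves path visited : List (Int × Int)), moves.length ≤ n →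
      (∀ p ∈ moves, heuristicA grid p foodPos < 99999999) →
      loopA grid foodPos gA moves path visited =
      loopB grid foodPos gB
        (PySem.List.sorted moves (fun q => heuristicA grid q foodPos)) path visited := by
  intro n
  induction n with
  | zero =>
    intro moves path visited hlen _
    have : moves = [] := List.eq_nil_of_length_eq_zero (Nat.le_zero.mp hlen)
    subst this
    rw [loopA]
    simp [PySem.List.sorted, loopB]
  | succ n ih =>
    intro moves path visited hlen hb
    cases moves with
    | nil => rw [loopA]; simp [PySem.List.sorted, loopB]
    | cons x xs =>
      have hrm := removeMinA_eq grid foodPos x xs hb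
      have hsort := sorted_sel (fun q => heuristicA grid q foodPos) xs x
      have hmem := pvFmin_mem (fun q => heuristicA grid q foodPos) xs x
      obtain ⟨m, hm⟩ : ∃ m, pvFmin (fun q => heuristicA grid q foodPos) x xs = m := ⟨_, rfl⟩
      rw [hm] at hrm hsort hmem
      simp only [erase_inst_eq] at hsort
      rw [loopA]
      simp only [hrm]
      rw [hsort, loopB]
      have hlen' : ((x :: xs).erase m).length ≤ n := by
        rw [List.length_erase_of_mem hmem]
        simp only [List.length_cons] at hlen ⊢
        omega
      have hb' : ∀ p ∈ (x :: xs).erase m, heuristicA grid p foodPos < 99999999 :=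
        fun p hp => hb p (List.mem_of_mem_erase hp)
      by_cases hv : m ∈ visited
      · simp only [if_pos hv]
        exact ih _ _ _ hlen' hb'
      · simp only [if_neg hv, hgo]
        by_cases hs2 : (gB m (path ++ [m]) (visited ++ [m])).1 = true
        · simp [hs2]
        · simp only [Bool.not_eq_true] at hs2
          simp only [hs2, Bool.false_eq_true, if_false]
          exact ih _ _ _ hlen' hb'

-- on-grid heuristics stay below the sentinel, given the Pre_ bound
theorem far_bound (grid : List (List Int)) (foodPos : Int × Int)
    (hfar : ∀ r ∈ List.range grid.length, ∀ c ∈ List.range (grid.headD []).length,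
      |(r : Int) - foodPos.1| + |(c : Int) - foodPos.2| < 99999998) :
    ∀ p : Int × Int, isValidA grid p = true → heuristicA grid p foodPos < 99999999 := by
  intro p hp
  rw [show isValidA grid p = (if p.1 < 0 ∨ p.1 ≥ (grid.length : Int) then false
    else if p.2 < 0 ∨ p.2 ≥ ((grid.headD []).length : Int) then false else true) from rfl] at hp
  split_ifs at hp with h1 h2
  · push_neg at h1 h2
    have hr : p.1.toNat ∈ List.range grid.length := by
      rw [List.mem_range]; omega
    have hc : p.2.toNat ∈ List.range (grid.headD []).length := by
      rw [List.mem_range]; omega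
    have := hfar _ hr _ hc
    rw [Int.toNat_of_nonneg (by omega), Int.toNat_of_nonneg (by omega)] at this
    unfold heuristicA manhattanA
    split_ifs <;> simp <;> omega

theorem go_eq (grid : List (List Int)) (foodPos : Int × Int)
    (hfar : ∀ p : Int × Int, isValidA grid p = true → heuristicA grid p foodPos < 99999999) :
    ∀ (f : Nat) (pos : Int × Int) (path visited : List (Int × Int)),
      goA grid foodPos f pos path visited = goB grid foodPos f pos path visited := by
  intro f
  induction f with
  | zero => intro pos path visited; rfl
  | succ f ih =>
    intro pos path visited
    rw [goA, goB]
    by_cases hp : pos = foodPos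
    · simp [hp]
    · simp only [if_neg hp]
      rw [movesB_eq, heuristicB_eq]
      exact loop_eq grid foodPos _ _ ih (possibleMovesA grid pos).length _ _ _ (le_refl _)
        (fun p hp => hfar p (mem_possibleMovesA_valid grid pos p hp))

theorem go_eq_food (grid : List (List Int)) (foodPos : Int × Int)
    (f : Nat) (pos : Int × Int) (path visited : List (Int × Int)) (h : pos = foodPos) :
    goA grid foodPos f pos path visited = goB grid foodPos f pos path visited := by
  cases f with
  | zero => rfl
  | succ f => rw [goA, goB]; simp [h]

theorem possibleMovesA_nil (grid : List (List Int)) (pos : Int × Int)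
    (h : ∀ q ∈ [(pos.1 - 1, pos.2), (pos.1, pos.2 - 1), (pos.1, pos.2 + 1), (pos.1 + 1, pos.2)],
      ¬ (0 ≤ q.1 ∧ q.1 < (grid.length : Int) ∧ 0 ≤ q.2 ∧ q.2 < ((grid.headD []).length : Int))) :
    possibleMovesA grid pos = [] := by
  have hv : ∀ q ∈ [(pos.1 - 1, pos.2), (pos.1, pos.2 - 1), (pos.1, pos.2 + 1), (pos.1 + 1, pos.2)],
      isValidA grid q = false := by
    intro q hq
    have := h q hq
    rw [show isValidA grid q = (if q.1 < 0 ∨ q.1 ≥ (grid.length : Int) then false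
      else if q.2 < 0 ∨ q.2 ≥ ((grid.headD []).length : Int) then false else true) from rfl]
    split_ifs <;> first | rfl | omega
  unfold possibleMovesA
  dsimp only
  rw [hv _ (by simp), hv _ (by simp), hv _ (by simp), hv _ (by simp)]
  simp

theorem go_eq_blocked (grid : List (List Int)) (foodPos : Int × Int) (pos : Int × Int)
    (h : ∀ q ∈ [(pos.1 - 1, pos.2), (pos.1, pos.2 - 1), (pos.1, pos.2 + 1), (pos.1 + 1, pos.2)],
      ¬ (0 ≤ q.1 ∧ q.1 < (grid.length : Int) ∧ 0 ≤ q.2 ∧ q.2 < ((grid.headD []).length : Int))) :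
    ∀ (f : Nat) (path visited : List (Int × Int)),
      goA grid foodPos f pos path visited = goB grid foodPos f pos path visited := by
  intro f path visited
  cases f with
  | zero => rfl
  | succ f =>
    rw [goA, goB]
    by_cases hp : pos = foodPos
    · simp [hp]
    · simp only [if_neg hp]
      rw [movesB_eq, possibleMovesA_nil grid pos h, loopA]
      simp [PySem.List.sorted, loopB]

-- ===== VERDICT =====
theorem pacman_astar_spec : Claim_equal_pacman_astar := by
  intro grid pos foodPos path visited _ hpre
  unfold Spec_pacman_astar pacman_astar pacman_astar_alt
  rcases hpre with h | ⟨_, hblock⟩ | ⟨_, _, hfar⟩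
  · exact go_eq_food grid foodPos _ pos path visited h
  · exact go_eq_blocked grid foodPos pos hblock _ path visited
  · exact go_eq grid foodPos (far_bound grid foodPos hfar) _ pos path visited
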